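-- pv_equiv track=rewrite | github.com/penteract/adventofcode | 2019/4/fastsol.py | countFrom
-- ===== SOURCE A (Python) =====
-- def fac(n):
--     if n<=1: return 1
--     return n*fac(n-1)
--
-- def ncr(n,r):
--     """n Choose r"""
--     if r<0 or r>n: return 0
--     return fac(n)//fac(r)//fac(n-r)
--
-- def ci(sz,n):
--     return ncr(sz+n-1,n)
--
-- def nd(sz,n):
--     return ncr(sz,n)
--
-- def withdup(sz,n):
--     """how many length n nondecreasing sequences are there with a repeated value"""
--     return ci(sz,n) - nd(sz,n)
--
-- def countFrom(k):
--     """How many numbers greaer than or equal to k with the same number of digits as k are allowed?"""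
--     # example 133501:
--     # withdup(10-2,6) (2xxxxx,3xxxxx..9xxxxx)
--     # +withdup(10-4,5) (14xxxx,15xxxx,..,19xxxx)
--     # +withdup(10-4,4) (134xxx,135xxx,..139xxx)
--     # +ci(10-5,3) (1335xx,1336xx,..1339xx)
--     # example 1200:
--     # withdup(10-2,4)
--     # +withdup(10-2,3)
--
--     f = withdup
--     s = str(k)
--     n = len(s)
--     tot=0
--     for i in range(1,len(s)):
--         if s[i-1]>s[i]:
--             tot += f(10-int(s[i-1]),n-(i-1))
--             break
--         tot += f(9-int(s[i-1]),n-(i-1))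
--         if s[i]==s[i-1]:
--             f = ci
--     else: # last digit should be dealt with
--         tot+= f((10-int(s[-1])) ,1)
--     return tot
-- ===== SOURCE B (Python) =====
-- def countFrom(k):
--     """How many numbers greater than or equal to k with the same number of digits
--     as k have nondecreasing digits and a repeated (adjacent equal) digit?
--     Single forward digit DP instead of summed choose-terms."""
--     s = [int(c) for c in str(k)]
--     n = len(s)
--     # free states (prefix already strictly above k's prefix): counts by last digit
--     nodup = [0] * 10   # no adjacent equal pair yet
--     dup = [0] * 10     # some adjacent equal pair already present
--     for d in range(s[0] + 1, 10):
--         nodup[d] = 1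
--     tight = True       # the prefix equal to k's prefix is still alive
--     tdup = False       # ... and whether it already contains an equal pair
--     for i in range(1, n):
--         new_nodup = [sum(nodup[e] for e in range(d)) for d in range(10)]
--         new_dup = [nodup[d] + sum(dup[e] for e in range(d + 1)) for d in range(10)]
--         if tight:
--             last = s[i - 1]
--             for d in range(max(last, s[i] + 1), 10):
--                 if tdup or d == last:
--                     new_dup[d] += 1
--                 else:
--                     new_nodup[d] += 1
--             if s[i] >= last:
--                 tdup = tdup or s[i] == last
--             else:
--                 tight = False
--         nodup, dup = new_nodup, new_dup
--     return sum(dup) + (1 if tight and tdup else 0)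
-- ===== Notes on version B (the rewrite author's own statement) =====
-- stated objective: alternative
-- what changed: Replaces the prefix scan that sums factorial-based choose-terms (with a function-switch from withdup to ci after an equal pair) by a single forward digit DP over per-last-digit state counts (nodup/dup vectors plus a tight-prefix flag), which also fixes A's overcount after an equal digit pair.
-- intended difference: On k whose decimal digits reach an adjacent equal pair before any descent, at position t with s[t] + (n - t) <= 9 (e.g. k = 11), A overcounts by C(9 - s[t], n - t): after switching f to ci it counts completions that replace the second digit of the (only) equal pair and thus have no repeated digit at all (A(11) = 17), while B returns the true count of nondecreasing numbers >= k with a repeated digit (B(11) = 9), which is what countFrom's docstring and the AoC-2019-day-4 rule ask for. — e.g. on countFrom(11): A returns 17, B returns 9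
import Mathlib
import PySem

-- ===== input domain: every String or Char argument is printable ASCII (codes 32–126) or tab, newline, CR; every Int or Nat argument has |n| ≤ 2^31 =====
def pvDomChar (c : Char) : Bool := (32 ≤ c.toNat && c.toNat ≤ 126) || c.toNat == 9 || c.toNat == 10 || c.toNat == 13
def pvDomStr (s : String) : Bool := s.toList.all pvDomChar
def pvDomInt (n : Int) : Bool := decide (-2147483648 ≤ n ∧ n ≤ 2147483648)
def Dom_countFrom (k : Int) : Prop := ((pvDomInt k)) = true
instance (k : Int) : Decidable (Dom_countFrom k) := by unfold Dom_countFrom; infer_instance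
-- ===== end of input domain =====

-- B replaces A's choose-term prefix scan by a forward digit DP (per-last-digit state
-- vectors + tight flag); on inputs in D_countFrom below it also fixes A's overcount
-- after an equal digit pair. Objective: alternative algorithm (not claimed faster).


-- ===== PORT A =====
def pvADig (c : Char) : Int := (PySem.Int.ofChars? [c]).getD 0

-- fac with a fuel counter (n.toNat steps always suffice); guards totality only
def pvFacGo : Nat → Int → Int
  | 0, _ => 1
  | fuel + 1, n => if n ≤ 1 then 1 else n * pvFacGo fuel (n - 1)
def pvFac (n : Int) : Int := pvFacGo n.toNat n

def pvNcr (n r : Int) : Int :=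
  if r < 0 ∨ n < r then 0
  else PySem.Int.floordiv (PySem.Int.floordiv (pvFac n) (pvFac r)) (pvFac (n - r))

def pvCi (sz n : Int) : Int := pvNcr (sz + n - 1) n
def pvNd (sz n : Int) : Int := pvNcr sz n
def pvWithdup (sz n : Int) : Int := pvCi sz n - pvNd sz n

def pvALoop (s : List Char) (n : Int) :
    List Int → (Int → Int → Int) → Int → Int × (Int → Int → Int) × Bool
  | [], f, tot => (tot, f, false)
  | i :: rest, f, tot =>
    let c0 := PySem.List.pyGetD s (i - 1) ' '
    let c1 := PySem.List.pyGetD s i ' '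
    if c1 < c0 then
      (tot + f (10 - pvADig c0) (n - (i - 1)), f, true)
    else
      let tot' := tot + f (9 - pvADig c0) (n - (i - 1))
      let f' := if c1 = c0 then pvCi else f
      pvALoop s n rest f' tot'

def countFrom (k : Int) : Int :=
  let s := PySem.Int.toChars k
  let n : Int := s.length
  match pvALoop s n (PySem.List.pyRange 1 n 1) pvWithdup 0 with
  | (tot, f, broke) =>
    if broke then tot else tot + f (10 - pvADig (PySem.List.pyGetD s (-1) ' ')) 1

-- ===== PORT B =====
def pvBDig (c : Char) : Int := (PySem.Int.ofChars? [c]).getD 0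

def pvBFree (nodup dup : List Int) : List Int × List Int :=
  (((PySem.List.pyRange 0 10 1).map fun d =>
      (((PySem.List.pyRange 0 d 1).map fun e => PySem.List.pyGetD nodup e 0).sum)),
   ((PySem.List.pyRange 0 10 1).map fun d =>
      PySem.List.pyGetD nodup d 0 +
        (((PySem.List.pyRange 0 (d + 1) 1).map fun e => PySem.List.pyGetD dup e 0).sum)))

def pvBRelease (last : Int) (tdup : Bool) (lo : Int) (nn nd : List Int) : List Int × List Int :=
  (PySem.List.pyRange lo 10 1).foldl
    (fun (p : List Int × List Int) d =>
      if tdup || d == last then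
        (p.1, p.2.set d.toNat (PySem.List.pyGetD p.2 d 0 + 1))
      else
        (p.1.set d.toNat (PySem.List.pyGetD p.1 d 0 + 1), p.2))
    (nn, nd)

def countFrom_alt (k : Int) : Int :=
  let s : List Int := (PySem.Int.toChars k).map pvBDig
  let n : Int := s.length
  let nodup0 : List Int :=
    (PySem.List.pyRange (PySem.List.pyGetD s 0 0 + 1) 10 1).foldl
      (fun v d => v.set d.toNat 1) (List.replicate 10 0)
  let dup0 : List Int := List.replicate 10 0
  let st :=
    (PySem.List.pyRange 1 n 1).foldl
      (fun (st : List Int × List Int × Bool × Bool) i =>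
        let nodup := st.1
        let dup := st.2.1
        let tight := st.2.2.1
        let tdup := st.2.2.2
        let free := pvBFree nodup dup
        if tight then
          let last := PySem.List.pyGetD s (i - 1) 0
          let si := PySem.List.pyGetD s i 0
          let rel := pvBRelease last tdup (max last (si + 1)) free.1 free.2
          if si ≥ last then (rel.1, rel.2, true, tdup || si == last)
          else (rel.1, rel.2, false, tdup)
        else (free.1, free.2, false, tdup))
      (nodup0, dup0, true, false)
  st.2.1.sum + (if st.2.2.1 && st.2.2.2 then 1 else 0)

-- ===== PRECONDITION & SPEC =====
-- Pre_ excludes exactly the k on which the Python A raises: for k < 0, str(k) starts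
-- with '-' and int('-') raises ValueError (B raises there too).
def Pre_countFrom (k : Int) : Prop := 0 ≤ k
instance (k : Int) : Decidable (Pre_countFrom k) := by unfold Pre_countFrom; infer_instance
def pvWitness_countFrom : Int := 133501

-- On k whose decimal digits reach an adjacent equal pair (at position t, 1-based second
-- element) before any descent, with s[t] + (n - t) ≤ 9, A returns an overcount larger by
-- C(9 - s[t], n - t): after switching f to ci it also counts completions that replace the
-- second digit of the only equal pair and hence have no repeated digit; B returns the true
-- count of nondecreasing numbers ≥ k with a repeated digit, which is what A's docstring
-- (and AoC 2019 day 4) asks for.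
def pvDDig (c : Char) : Int := (c.toNat : Int) - 48
def pvDScan : List Int → Bool
  | d0 :: d1 :: rest =>
    if d0 = d1 then decide (d1 + ((rest.length : Int) + 1) ≤ 9)
    else if d1 < d0 then false
    else pvDScan (d1 :: rest)
  | _ => false
def D_countFrom (k : Int) : Prop := pvDScan ((PySem.Int.toChars k).map pvDDig) = true
instance (k : Int) : Decidable (D_countFrom k) := by unfold D_countFrom; infer_instance

def Spec_countFrom (k : Int) (out : Int) : Prop := ¬ D_countFrom k → out = countFrom_alt k
instance (k : Int) (out : Int) : Decidable (Spec_countFrom k out) := by unfold Spec_countFrom; infer_instance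

def pvDiffWitness_countFrom : Int := 11
def pvDiffWitnessOut_countFrom : Int × Int := (17, 9)

-- ===== CLAIM (what is proved, stated in full; the proofs are below) =====
def Claim_unchanged_countFrom : Prop := ∀ (k : Int), Dom_countFrom k → Pre_countFrom k → Spec_countFrom k (countFrom k)
def Claim_changed_countFrom : Prop := Dom_countFrom (pvDiffWitness_countFrom) ∧ Pre_countFrom (pvDiffWitness_countFrom) ∧ D_countFrom (pvDiffWitness_countFrom) ∧ countFrom (pvDiffWitness_countFrom) = pvDiffWitnessOut_countFrom.1 ∧ countFrom_alt (pvDiffWitness_countFrom) = pvDiffWitnessOut_countFrom.2 ∧ pvDiffWitnessOut_countFrom.1 ≠ pvDiffWitnessOut_countFrom.2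
def Claim_exact_countFrom : Prop := ∀ (k : Int), Dom_countFrom k → Pre_countFrom k → D_countFrom k → countFrom k ≠ countFrom_alt k

-- ===== LEMMAS AND PROOFS =====

def pvDelta (c : Char) : Int := (c.toNat : Int) - 48
def pvIsDig (c : Char) : Prop := '0' ≤ c ∧ c ≤ '9'

theorem dig_cases (c : Char) (h : pvIsDig c) :
    c = '0' ∨ c = '1' ∨ c = '2' ∨ c = '3' ∨ c = '4' ∨ c = '5' ∨ c = '6' ∨ c = '7' ∨ c = '8' ∨ c = '9' := by
  obtain ⟨h1, h2⟩ := h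
  have l1 : 48 ≤ c.toNat := h1
  have l2 : c.toNat ≤ 57 := h2
  have : c.toNat = 48 ∨ c.toNat = 49 ∨ c.toNat = 50 ∨ c.toNat = 51 ∨ c.toNat = 52 ∨ c.toNat = 53
      ∨ c.toNat = 54 ∨ c.toNat = 55 ∨ c.toNat = 56 ∨ c.toNat = 57 := by omega
  have hc : ∀ m : Nat, c.toNat = m → c = Char.ofNat m := by
    intro m hm; subst hm; simp [Char.ofNat_toNat]
  rcases this with h|h|h|h|h|h|h|h|h|h <;> simp [hc _ h]

theorem dig_val (c : Char) (h : pvIsDig c) : pvADig c = pvDelta c := by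
  rcases dig_cases c h with h|h|h|h|h|h|h|h|h|h <;> subst h <;> decide

theorem digB_val (c : Char) (h : pvIsDig c) : pvBDig c = pvDelta c := dig_val c h

theorem dig_lt (c0 c1 : Char) (h0 : pvIsDig c0) (h1 : pvIsDig c1) :
    (c1 < c0) ↔ pvDelta c1 < pvDelta c0 := by
  rcases dig_cases c0 h0 with h|h|h|h|h|h|h|h|h|h <;> subst h <;>
  rcases dig_cases c1 h1 with h|h|h|h|h|h|h|h|h|h <;> subst h <;> decide
theorem dig_eq (c0 c1 : Char) (h0 : pvIsDig c0) (h1 : pvIsDig c1) :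
    (c1 = c0) ↔ pvDelta c1 = pvDelta c0 := by
  rcases dig_cases c0 h0 with h|h|h|h|h|h|h|h|h|h <;> subst h <;>
  rcases dig_cases c1 h1 with h|h|h|h|h|h|h|h|h|h <;> subst h <;> decide
theorem delta_bounds (c : Char) (h : pvIsDig c) : 0 ≤ pvDelta c ∧ pvDelta c ≤ 9 := by
  rcases dig_cases c h with h|h|h|h|h|h|h|h|h|h <;> subst h <;> decide

theorem core_digits (b : Nat) (hb : 2 ≤ b) (hb16 : b ≤ 10) :
    ∀ (fuel n : Nat) (acc : List Char), (∀ c ∈ acc, '0' ≤ c ∧ c ≤ '9') →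
      ∀ c ∈ Nat.toDigitsCore b fuel n acc, '0' ≤ c ∧ c ≤ '9' := by
  intro fuel
  induction fuel with
  | zero => intro n acc hacc c hc; exact hacc c hc
  | succ f ih =>
    intro n acc hacc c hc
    unfold Nat.toDigitsCore at hc
    have hdig : '0' ≤ (n % b).digitChar ∧ (n % b).digitChar ≤ '9' := by
      have h : n % b < 10 := lt_of_lt_of_le (Nat.mod_lt _ (by omega)) hb16
      interval_cases h' : n % b <;> simp_all [Nat.digitChar] <;> decide
    by_cases h : n / b = 0 <;> simp only [h, if_true, if_false, reduceIte] at hc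
    · rcases List.mem_cons.mp hc with he | he
      · exact he ▸ hdig
      · exact hacc c he
    · exact ih _ _ (by intro c hc; rcases List.mem_cons.mp hc with he | he; exact he ▸ hdig; exact hacc c he) c hc

theorem core_ne_nil (b : Nat) : ∀ (fuel n : Nat) (acc : List Char),
    acc ≠ [] ∨ 0 < fuel → Nat.toDigitsCore b fuel n acc ≠ [] := by
  intro fuel
  induction fuel with
  | zero => intro n acc h; simpa [Nat.toDigitsCore] using h.resolve_right (by omega)
  | succ f ih =>
    intro n acc h
    unfold Nat.toDigitsCore
    by_cases hz : n / b = 0 <;> simp only [hz, if_true, if_false, reduceIte]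
    · simp
    · exact ih _ _ (Or.inl (by simp))

theorem toChars_digits (k : Int) (hk : 0 ≤ k) :
    PySem.Int.toChars k ≠ [] ∧ ∀ c ∈ PySem.Int.toChars k, pvIsDig c := by
  have h : PySem.Int.toChars k = Nat.toDigits 10 k.toNat := by
    unfold PySem.Int.toChars
    rw [if_neg (by omega)]
  rw [h]
  unfold Nat.toDigits
  exact ⟨core_ne_nil 10 (k.toNat + 1) k.toNat [] (Or.inr (by omega)),
    fun c hc => core_digits 10 (by norm_num) (by norm_num) _ _ _ (by simp) c hc⟩

def NDf (d : Int) : Nat → Int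
  | 0 => 1
  | m + 1 => ((PySem.List.pyRange d 10 1).map fun e => NDf e m).sum
def SIcf (d : Int) : Nat → Int
  | 0 => 1
  | m + 1 => ((PySem.List.pyRange (d + 1) 10 1).map fun e => SIcf e m).sum
def Wf (d : Int) (m : Nat) : Int := NDf d m - SIcf d m
def freeval (nodup dup : List Int) (m : Nat) : Int :=
  ((PySem.List.pyRange 0 10 1).map fun d =>
      PySem.List.pyGetD dup d 0 * NDf d m + PySem.List.pyGetD nodup d 0 * Wf d m).sum

theorem facgo_eq (fuel : Nat) : ∀ n : Int, n.toNat ≤ fuel → pvFacGo fuel n = ((n.toNat).factorial : Int) := by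
  induction fuel with
  | zero => intro n h; have : n.toNat = 0 := by omega
            simp [pvFacGo, this]
  | succ f ih =>
    intro n h
    by_cases h1 : n ≤ 1
    · have : n.toNat = 0 ∨ n.toNat = 1 := by omega
      rcases this with h2 | h2 <;> simp [pvFacGo, h1, h2]
    · have h2 : (n-1).toNat ≤ f := by omega
      have h3 : n.toNat = (n-1).toNat + 1 := by omega
      simp only [pvFacGo, if_neg h1, ih _ h2, h3, Nat.factorial_succ]
      push_cast
      rw [show ((n-1).toNat : Int) + 1 = n by omega]

theorem fac_eq (n : Int) : pvFac n = ((n.toNat).factorial : Int) := facgo_eq _ n le_rfl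

theorem fd_exact (a b : Int) (hb : 0 < b) : PySem.Int.floordiv (b * a) b = a := by
  rw [PySem.Int.floordiv_eq_ediv_of_pos hb, Int.mul_ediv_cancel_left _ (by omega)]

theorem ncr_choose (n r : Int) (h0 : 0 ≤ r) (h1 : r ≤ n) :
    pvNcr n r = ((n.toNat).choose r.toNat : Int) := by
  have hkey : (n.toNat).choose r.toNat * (r.toNat).factorial * ((n.toNat) - r.toNat).factorial
      = (n.toNat).factorial := Nat.choose_mul_factorial_mul_factorial (by omega)
  have hr : 0 < ((r.toNat).factorial : Int) := by exact_mod_cast (r.toNat).factorial_pos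
  have hnr : 0 < (((n-r).toNat).factorial : Int) := by exact_mod_cast ((n-r).toNat).factorial_pos
  have e1 : pvFac n = ((r.toNat).factorial : Int) * ((((n.toNat) - r.toNat).factorial : Int) * ((n.toNat).choose r.toNat : Int)) := by
    rw [fac_eq, ← hkey]; push_cast; ring
  have e2 : (n - r).toNat = n.toNat - r.toNat := by omega
  have hfr : pvFac r = ((r.toNat).factorial : Int) := fac_eq r
  have hfnr : pvFac (n - r) = (((n.toNat - r.toNat)).factorial : Int) := by rw [fac_eq, e2]
  rw [pvNcr, if_neg (by omega), e1, hfr, fd_exact _ _ hr, hfnr,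
    fd_exact _ _ (by rw [← e2]; exact hnr)]

-- Pascal for pvCi : pvCi x (M+1) = pvCi x M + pvCi (x-1) (M+1) for 1 ≤ x, 0 ≤ M
theorem ci_pascal (x : Int) (hx : 1 ≤ x) (M : Nat) :
    pvCi x ((M : Int) + 1) = pvCi x (M : Int) + pvCi (x - 1) ((M : Int) + 1) := by
  unfold pvCi
  rw [show x + ((M:Int) + 1) - 1 = x + M - 1 + 1 by ring,
      show x - 1 + ((M:Int) + 1) - 1 = x + M - 1 by ring]
  rcases eq_or_lt_of_le hx with h1 | h2
  · have hx1 : x = 1 := h1.symm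
    subst hx1
    rw [ncr_choose _ _ (by omega) (by omega), ncr_choose _ _ (by omega) (by omega)]
    rw [show (1:Int) + M - 1 = (M:Int) by ring]
    unfold pvNcr
    rw [if_pos (by omega)]
    have e1 : ((M:Int) + 1).toNat = M + 1 := by omega
    have e2 : ((M:Int)).toNat = M := by omega
    simp [e1, e2, Nat.choose_self]
  · rw [ncr_choose _ _ (by omega) (by omega), ncr_choose _ _ (by omega) (by omega),
        ncr_choose _ _ (by omega) (by omega)]
    have e1 : (x + (M:Int) - 1 + 1).toNat = (x + M - 1).toNat + 1 := by omega
    have e2 : ((M:Int) + 1).toNat = M + 1 := by omega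
    have e3 : ((M:Int)).toNat = M := by omega
    rw [e1, e2, e3, Nat.choose_succ_succ']
    push_cast; ring

theorem ci_zero_right (M : Nat) (h : 1 ≤ M) : pvCi 0 (M : Int) = 0 := by
  unfold pvCi pvNcr
  rw [if_pos (by omega)]

theorem nd_eq_choose (x y : Int) (hx : 0 ≤ x) (hy : 0 ≤ y) :
    pvNd x y = ((x.toNat).choose y.toNat : Int) := by
  rcases le_or_gt y x with h | h
  · exact ncr_choose x y hy h
  · unfold pvNd pvNcr
    rw [if_pos (by omega), Nat.choose_eq_zero_of_lt (by omega)]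
    simp

theorem sum_ci (m : Nat) : ∀ q : Nat, q ≤ 10 →
    ((PySem.List.pyRange (10 - (q:Int)) 10 1).map fun e => pvCi (10 - e) (m:Int)).sum
      = pvCi (q:Int) ((m:Int)+1) := by
  intro q
  induction q with
  | zero =>
    intro _
    rw [PySem.List.pyRange_one_eq_nil (by omega)]
    simp
    rw [show (m:Int) + 1 = ((m+1 : Nat) : Int) by push_cast; ring, ci_zero_right (m+1) (by omega)]
  | succ q ih =>
    intro hq
    rw [PySem.List.pyRange_one_cons (by omega), List.map_cons, List.sum_cons]
    have e0 : 10 - ((q+1 : Nat):Int) + 1 = 10 - (q:Int) := by push_cast; ring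
    have e1 : (10 : Int) - (10 - ((q+1:Nat):Int)) = (q:Int) + 1 := by push_cast; ring
    rw [e0, e1, ih (by omega)]
    have e2 : ((q+1 : Nat) : Int) = (q:Int) + 1 := by push_cast; ring
    rw [e2, ci_pascal ((q:Int)+1) (by omega) m]
    ring_nf

theorem ci_eq_ND : ∀ (m : Nat) (p : Int), 0 ≤ p → p ≤ 10 → (p ≤ 9 ∨ 1 ≤ m) →
    pvCi (10 - p) (m : Int) = NDf p m := by
  intro m
  induction m with
  | zero =>
    intro p h0 h10 h
    have h9 : p ≤ 9 := by omega
    rw [show ((0:Nat):Int) = (0:Int) from rfl]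
    unfold NDf pvCi
    rw [ncr_choose _ _ (by omega) (by omega)]
    simp
  | succ m ih =>
    intro p h0 h10 _
    show pvCi (10 - p) ((m:Int)+1) = NDf p (m+1)
    unfold NDf
    have hcongr : ((PySem.List.pyRange p 10 1).map fun e => NDf e m).sum
        = ((PySem.List.pyRange p 10 1).map fun e => pvCi (10 - e) (m:Int)).sum := by
      congr 1
      apply List.map_congr_left
      intro e he
      rw [PySem.List.mem_pyRange_one] at he
      exact (ih e (by omega) (by omega) (by omega)).symm
    rw [hcongr]
    symm
    calc ((PySem.List.pyRange p 10 1).map fun e => pvCi (10 - e) (m:Int)).sum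
        = ((PySem.List.pyRange (10 - ((10-p).toNat : Int)) 10 1).map fun e => pvCi (10 - e) (m:Int)).sum := by
          rw [show (10 - ((10-p).toNat : Int)) = p by omega]
      _ = pvCi ((10-p).toNat : Int) ((m:Int)+1) := sum_ci m (10-p).toNat (by omega)
      _ = pvCi (10 - p) ((m:Int)+1) := by rw [show (((10-p).toNat : Int)) = 10 - p by omega]

theorem sum_nd (m : Nat) : ∀ j : Nat, j ≤ 10 →
    ((PySem.List.pyRange (10 - (j:Int)) 10 1).map fun e => pvNd (9 - e) (m:Int)).sum
      = pvNd (j:Int) ((m:Int)+1) := by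
  intro j
  induction j with
  | zero =>
    intro _
    rw [PySem.List.pyRange_one_eq_nil (by omega)]
    simp
    unfold pvNd pvNcr
    rw [if_pos (by omega)]
  | succ j ih =>
    intro hj
    rw [PySem.List.pyRange_one_cons (by omega), List.map_cons, List.sum_cons]
    have e0 : 10 - ((j+1 : Nat):Int) + 1 = 10 - (j:Int) := by push_cast; ring
    have e1 : (9 : Int) - (10 - ((j+1:Nat):Int)) = (j:Int) := by push_cast; ring
    rw [e0, e1, ih (by omega)]
    have e2 : ((j+1 : Nat) : Int) = (j:Int) + 1 := by push_cast; ring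
    rw [e2]
    rw [nd_eq_choose _ _ (by omega) (by omega), nd_eq_choose _ _ (by omega) (by omega),
        nd_eq_choose _ _ (by omega) (by omega)]
    have f1 : ((j:Int)+1).toNat = j + 1 := by omega
    have f2 : ((j:Int)).toNat = j := by omega
    have f3 : ((m:Int)+1).toNat = m + 1 := by omega
    have f4 : ((m:Int)).toNat = m := by omega
    rw [f1, f2, f3, f4, Nat.choose_succ_succ']
    push_cast; ring

theorem nd_eq_SIc : ∀ (m : Nat) (q : Int), -1 ≤ q → q ≤ 9 →
    pvNd (9 - q) (m : Int) = SIcf q m := by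
  intro m
  induction m with
  | zero =>
    intro q h0 h9
    rw [show ((0:Nat):Int) = (0:Int) from rfl]
    unfold SIcf pvNd
    rw [ncr_choose _ _ (by omega) (by omega)]
    simp
  | succ m ih =>
    intro q h0 h9
    show pvNd (9 - q) ((m:Int)+1) = SIcf q (m+1)
    unfold SIcf
    have hcongr : ((PySem.List.pyRange (q+1) 10 1).map fun e => SIcf e m).sum
        = ((PySem.List.pyRange (q+1) 10 1).map fun e => pvNd (9 - e) (m:Int)).sum := by
      congr 1
      apply List.map_congr_left
      intro e he
      rw [PySem.List.mem_pyRange_one] at he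
      exact (ih e (by omega) (by omega)).symm
    rw [hcongr]
    symm
    calc ((PySem.List.pyRange (q+1) 10 1).map fun e => pvNd (9 - e) (m:Int)).sum
        = ((PySem.List.pyRange (10 - ((9-q).toNat : Int)) 10 1).map fun e => pvNd (9 - e) (m:Int)).sum := by
          rw [show (10 - ((9-q).toNat : Int)) = q + 1 by omega]
      _ = pvNd ((9-q).toNat : Int) ((m:Int)+1) := sum_nd m (9-q).toNat (by omega)
      _ = pvNd (9 - q) ((m:Int)+1) := by rw [show (((9-q).toNat : Int)) = 9 - q by omega]

def arun (p : Int) (flag : Bool) : List Int → Int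
  | [] => (if flag then pvCi else pvWithdup) (10 - p) 1
  | c :: rest =>
    if c < p then (if flag then pvCi else pvWithdup) (10 - p) ((rest.length : Int) + 2)
    else (if flag then pvCi else pvWithdup) (9 - p) ((rest.length : Int) + 2) +
      arun c (flag || c == p) rest

def aWrap (s : List Char) (n : Int) (idx : List Int) (f : Int → Int → Int) (tot : Int) : Int :=
  match pvALoop s n idx f tot with
  | (t, g, br) => if br then t else t + g (10 - pvADig (PySem.List.pyGetD s (-1) ' ')) 1

theorem aloop_run : ∀ (suf pre : List Char) (hpre : pre ≠ []),
    (∀ c ∈ pre ++ suf, pvIsDig c) → ∀ (flag : Bool) (tot : Int),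
    aWrap (pre ++ suf) ((pre ++ suf).length : Int)
        (PySem.List.pyRange (pre.length : Int) ((pre ++ suf).length : Int) 1)
        (if flag then pvCi else pvWithdup) tot
      = tot + arun (pvDelta (pre.getLast hpre)) flag (suf.map pvDelta) := by
  intro suf
  induction suf with
  | nil =>
    intro pre hpre hdig flag tot
    rw [show (pre ++ ([] : List Char)) = pre from List.append_nil pre] at *
    rw [PySem.List.pyRange_one_eq_nil (le_refl _)]
    rw [show aWrap pre ((pre.length : Nat) : Int) [] (if flag then pvCi else pvWithdup) tot
        = tot + (if flag then pvCi else pvWithdup) (10 - pvADig (PySem.List.pyGetD pre (-1) ' ')) 1 from rfl]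
    rw [PySem.List.pyGetD_neg_one _ ' ' hpre, dig_val _ (hdig _ (List.getLast_mem hpre))]
    rfl
  | cons c suf ih =>
    intro pre hpre hdig flag tot
    have hlenpre : 0 < pre.length := List.length_pos_of_ne_nil hpre
    have hlt : (pre.length : Int) < ((pre ++ c :: suf).length : Int) := by simp
    rw [PySem.List.pyRange_one_cons hlt]
    have hc1 : PySem.List.pyGetD (pre ++ c :: suf) ((pre.length : Nat) : Int) ' ' = c := by
      rw [show PySem.List.pyGetD (pre ++ c :: suf) ((pre.length : Nat) : Int) ' '
          = (PySem.List.pyGet? (pre ++ c :: suf) ((pre.length : Nat) : Int)).getD ' ' from rfl,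
         PySem.List.pyGet?_append_length]
      rfl
    have hc0 : PySem.List.pyGetD (pre ++ c :: suf) ((pre.length : Int) - 1) ' ' = pre.getLast hpre := by
      rw [show PySem.List.pyGetD (pre ++ c :: suf) ((pre.length : Int) - 1) ' '
          = (PySem.List.pyGet? (pre ++ c :: suf) ((pre.length : Int) - 1)).getD ' ' from rfl,
         PySem.List.pyGet?_of_nonneg _ (by omega),
         show ((pre.length : Int) - 1).toNat = pre.length - 1 from by omega,
         List.getElem?_append_left (by omega),
         List.getElem?_eq_getElem (by omega)]
      rw [List.getLast_eq_getElem]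
      rfl
    have hdl : pvIsDig (pre.getLast hpre) := hdig _ (by simp [List.getLast_mem hpre])
    have hdc : pvIsDig c := hdig c (by simp)
    have harg : ((pre ++ c :: suf).length : Int) - ((pre.length : Int) - 1) = (suf.length : Int) + 2 := by
      simp; omega
    by_cases hblt : c < pre.getLast hpre
    · rw [show aWrap (pre ++ c :: suf) ((pre ++ c :: suf).length : Int)
            ((pre.length : Int) :: PySem.List.pyRange ((pre.length : Int) + 1) ((pre ++ c :: suf).length : Int) 1)
            (if flag then pvCi else pvWithdup) tot
          = tot + (if flag then pvCi else pvWithdup) (10 - pvADig (pre.getLast hpre)) ((suf.length : Int) + 2) from by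
            unfold aWrap pvALoop
            rw [hc0, hc1, if_pos hblt, harg]
            rfl]
      rw [show arun (pvDelta (pre.getLast hpre)) flag ((c :: suf).map pvDelta)
          = (if flag then pvCi else pvWithdup) (10 - pvDelta (pre.getLast hpre)) (((suf.map pvDelta).length : Int) + 2) from by
            conv_lhs => rw [List.map_cons, arun]
            rw [if_pos ((dig_lt _ _ hdl hdc).mp hblt)]]
      rw [dig_val _ hdl, List.length_map]
    · have hstep : aWrap (pre ++ c :: suf) ((pre ++ c :: suf).length : Int)
            ((pre.length : Int) :: PySem.List.pyRange ((pre.length : Int) + 1) ((pre ++ c :: suf).length : Int) 1)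
            (if flag then pvCi else pvWithdup) tot
          = aWrap (pre ++ c :: suf) ((pre ++ c :: suf).length : Int)
            (PySem.List.pyRange ((pre.length : Int) + 1) ((pre ++ c :: suf).length : Int) 1)
            (if (flag || (pvDelta c == pvDelta (pre.getLast hpre))) then pvCi else pvWithdup)
            (tot + (if flag then pvCi else pvWithdup) (9 - pvDelta (pre.getLast hpre)) ((suf.length : Int) + 2)) := by
        unfold aWrap
        conv_lhs => rw [pvALoop]
        rw [hc0, hc1, if_neg hblt, harg, dig_val _ hdl]
        congr 2
        by_cases heq : c = pre.getLast hpre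
        · rw [if_pos heq, (beq_iff_eq).mpr ((dig_eq _ _ hdl hdc).mp heq), Bool.or_true]
          cases flag <;> rfl
        · rw [if_neg heq,
              show (pvDelta c == pvDelta (pre.getLast hpre)) = false from by
                rw [beq_eq_false_iff_ne]
                exact fun hcon => heq ((dig_eq _ _ hdl hdc).mpr hcon),
              Bool.or_false]
      rw [hstep]
      have hassoc : pre ++ c :: suf = (pre ++ [c]) ++ suf := by simp
      have hpre' : pre ++ [c] ≠ [] := by simp
      have hlast' : (pre ++ [c]).getLast hpre' = c := by
        rw [List.getLast_eq_getElem]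
        simp
      have hdig' : ∀ x ∈ (pre ++ [c]) ++ suf, pvIsDig x := by
        rw [← hassoc]; exact hdig
      have hih := ih (pre ++ [c]) hpre' hdig'
        (flag || (pvDelta c == pvDelta (pre.getLast hpre)))
        (tot + (if flag then pvCi else pvWithdup) (9 - pvDelta (pre.getLast hpre)) ((suf.length : Int) + 2))
      rw [← hassoc, hlast'] at hih
      rw [show (((pre ++ [c]).length : Nat) : Int) = (pre.length : Int) + 1 from by simp] at hih
      rw [hih]
      rw [show arun (pvDelta (pre.getLast hpre)) flag ((c :: suf).map pvDelta)
          = (if flag then pvCi else pvWithdup) (9 - pvDelta (pre.getLast hpre)) (((suf.map pvDelta).length : Int) + 2)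
            + arun (pvDelta c) (flag || (pvDelta c == pvDelta (pre.getLast hpre))) (suf.map pvDelta) from by
            conv_lhs => rw [List.map_cons, arun]
            rw [if_neg (fun hcon => hblt ((dig_lt _ _ hdl hdc).mpr hcon))]]
      rw [List.length_map]
      ring

theorem aphase (k : Int) (hk : 0 ≤ k) :
    countFrom k =
      arun (pvDelta ((PySem.Int.toChars k).headI)) false
        ((PySem.Int.toChars k).tail.map pvDelta) := by
  obtain ⟨hne, hdig⟩ := toChars_digits k hk
  obtain ⟨c0, t, hs⟩ : ∃ c0 t, PySem.Int.toChars k = c0 :: t := by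
    cases h : PySem.Int.toChars k with
    | nil => exact absurd h hne
    | cons a b => exact ⟨a, b, rfl⟩
  have h1 : countFrom k
      = aWrap (PySem.Int.toChars k) ((PySem.Int.toChars k).length : Int)
          (PySem.List.pyRange 1 ((PySem.Int.toChars k).length : Int) 1) pvWithdup 0 := rfl
  rw [h1, hs]
  have h2 : (c0 :: t) = [c0] ++ t := rfl
  have h3 : ((1 : Nat) : Int) = (1 : Int) := rfl
  have hdig' : ∀ x ∈ [c0] ++ t, pvIsDig x := by rw [← h2, ← hs]; exact hdig
  have h4 := aloop_run t [c0] (by simp) hdig' false 0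
  rw [← h2] at h4
  rw [show (([c0] : List Char).length : Int) = (1:Int) from rfl,
      show (if (false : Bool) then pvCi else pvWithdup) = pvWithdup from rfl] at h4
  rw [h4]
  simp [List.getLast]

def brun (nodup dup : List Int) (tight tdup : Bool) (p : Int) : List Int → Int
  | [] => dup.sum + (if tight && tdup then 1 else 0)
  | c :: cs =>
    let fr := pvBFree nodup dup
    if tight then
      let rel := pvBRelease p tdup (max p (c + 1)) fr.1 fr.2
      if c ≥ p then brun rel.1 rel.2 true (tdup || c == p) c cs
      else brun rel.1 rel.2 false tdup c cs
    else brun fr.1 fr.2 false tdup c cs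

def bBody (s : List Int) (st : List Int × List Int × Bool × Bool) (i : Int) :
    List Int × List Int × Bool × Bool :=
  let nodup := st.1
  let dup := st.2.1
  let tight := st.2.2.1
  let tdup := st.2.2.2
  let free := pvBFree nodup dup
  if tight then
    let last := PySem.List.pyGetD s (i - 1) 0
    let si := PySem.List.pyGetD s i 0
    let rel := pvBRelease last tdup (max last (si + 1)) free.1 free.2
    if si ≥ last then (rel.1, rel.2, true, tdup || si == last)
    else (rel.1, rel.2, false, tdup)
  else (free.1, free.2, false, tdup)

theorem bloop_run : ∀ (suf pre : List Char) (hpre : pre ≠ []),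
    (∀ c ∈ pre ++ suf, pvIsDig c) → ∀ (st : List Int × List Int × Bool × Bool),
    ((PySem.List.pyRange (pre.length : Int) ((((pre ++ suf).map pvBDig).length : Nat) : Int) 1).foldl
        (bBody ((pre ++ suf).map pvBDig)) st).2.1.sum
      + (if ((PySem.List.pyRange (pre.length : Int) ((((pre ++ suf).map pvBDig).length : Nat) : Int) 1).foldl
            (bBody ((pre ++ suf).map pvBDig)) st).2.2.1
          && ((PySem.List.pyRange (pre.length : Int) ((((pre ++ suf).map pvBDig).length : Nat) : Int) 1).foldl
            (bBody ((pre ++ suf).map pvBDig)) st).2.2.2 then 1 else 0)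
    = brun st.1 st.2.1 st.2.2.1 st.2.2.2 (pvDelta (pre.getLast hpre)) (suf.map pvDelta) := by
  intro suf
  induction suf with
  | nil =>
    intro pre hpre hdig st
    rw [List.append_nil, PySem.List.pyRange_one_eq_nil (by simp), List.foldl_nil]
    rfl
  | cons c suf ih =>
    intro pre hpre hdig st
    have hlenpre : 0 < pre.length := List.length_pos_of_ne_nil hpre
    have hdl : pvIsDig (pre.getLast hpre) := hdig _ (by simp [List.getLast_mem hpre])
    have hdc : pvIsDig c := hdig c (by simp)
    have hlt : (pre.length : Int) < ((((pre ++ c :: suf).map pvBDig).length : Nat) : Int) := by simp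
    rw [PySem.List.pyRange_one_cons hlt, List.foldl_cons]
    -- the two digit lookups
    have hc1 : PySem.List.pyGetD ((pre ++ c :: suf).map pvBDig) ((pre.length : Nat) : Int) 0 = pvDelta c := by
      rw [show PySem.List.pyGetD ((pre ++ c :: suf).map pvBDig) ((pre.length : Nat) : Int) 0
          = (PySem.List.pyGet? ((pre ++ c :: suf).map pvBDig) ((pre.length : Nat) : Int)).getD 0 from rfl,
         PySem.List.pyGet?_of_nonneg _ (by omega), Int.toNat_natCast, List.getElem?_map,
         List.getElem?_append_right (le_refl _)]
      simp [digB_val c hdc]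
    have hc0 : PySem.List.pyGetD ((pre ++ c :: suf).map pvBDig) ((pre.length : Int) - 1) 0
        = pvDelta (pre.getLast hpre) := by
      rw [show PySem.List.pyGetD ((pre ++ c :: suf).map pvBDig) ((pre.length : Int) - 1) 0
          = (PySem.List.pyGet? ((pre ++ c :: suf).map pvBDig) ((pre.length : Int) - 1)).getD 0 from rfl,
         PySem.List.pyGet?_of_nonneg _ (by omega),
         show ((pre.length : Int) - 1).toNat = pre.length - 1 from by omega,
         List.getElem?_map, List.getElem?_append_left (by omega),
         List.getElem?_eq_getElem (by omega)]
      rw [List.getLast_eq_getElem]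
      simp only [Option.map_some, Option.getD_some]
      exact digB_val _ (hdig _ (List.mem_append_left _ (List.getElem_mem _)))
    have hbody : bBody ((pre ++ c :: suf).map pvBDig) st ((pre.length : Nat) : Int)
        = (let fr := pvBFree st.1 st.2.1
           if st.2.2.1 then
             let rel := pvBRelease (pvDelta (pre.getLast hpre)) st.2.2.2
               (max (pvDelta (pre.getLast hpre)) (pvDelta c + 1)) fr.1 fr.2
             if pvDelta c ≥ pvDelta (pre.getLast hpre) then
               (rel.1, rel.2, true, st.2.2.2 || pvDelta c == pvDelta (pre.getLast hpre))
             else (rel.1, rel.2, false, st.2.2.2)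
           else (fr.1, fr.2, false, st.2.2.2)) := by
      unfold bBody
      rw [hc0, hc1]
    rw [hbody]
    have hassoc : pre ++ c :: suf = (pre ++ [c]) ++ suf := by simp
    have hpre' : pre ++ [c] ≠ [] := by simp
    have hlast' : (pre ++ [c]).getLast hpre' = c := by
      rw [List.getLast_eq_getElem]; simp
    have hdig' : ∀ x ∈ (pre ++ [c]) ++ suf, pvIsDig x := by rw [← hassoc]; exact hdig
    have hih := ih (pre ++ [c]) hpre' hdig'
    rw [← hassoc, hlast'] at hih
    rw [show (((pre ++ [c]).length : Nat) : Int) = (pre.length : Int) + 1 from by simp] at hih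
    rw [hih]
    -- now match brun's step
    conv_rhs => rw [List.map_cons, brun]
    by_cases htight : st.2.2.1
    · rw [if_pos htight]
      simp only [htight, if_true, ite_true]
      by_cases hge : pvDelta c ≥ pvDelta (pre.getLast hpre)
      · rw [if_pos hge, if_pos hge]
      · rw [if_neg hge, if_neg hge]
    · rw [if_neg htight]
      simp only [htight, Bool.false_eq_true, if_false, ite_false]

theorem bphase (k : Int) (hk : 0 ≤ k) :
    countFrom_alt k =
      brun
        ((PySem.List.pyRange (pvDelta ((PySem.Int.toChars k).headI) + 1) 10 1).foldl
          (fun v d => v.set d.toNat 1) (List.replicate 10 0))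
        (List.replicate 10 0) true false
        (pvDelta ((PySem.Int.toChars k).headI))
        ((PySem.Int.toChars k).tail.map pvDelta) := by
  obtain ⟨hne, hdig⟩ := toChars_digits k hk
  obtain ⟨c0, t, hs⟩ : ∃ c0 t, PySem.Int.toChars k = c0 :: t := by
    cases h : PySem.Int.toChars k with
    | nil => exact absurd h hne
    | cons a b => exact ⟨a, b, rfl⟩
  have h1 : countFrom_alt k =
      ((PySem.List.pyRange 1 ((((PySem.Int.toChars k).map pvBDig).length : Nat) : Int) 1).foldl
        (bBody ((PySem.Int.toChars k).map pvBDig))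
        ((PySem.List.pyRange (PySem.List.pyGetD ((PySem.Int.toChars k).map pvBDig) 0 0 + 1) 10 1).foldl
          (fun v d => v.set d.toNat 1) (List.replicate 10 0),
         List.replicate 10 0, true, false)).2.1.sum
      + (if ((PySem.List.pyRange 1 ((((PySem.Int.toChars k).map pvBDig).length : Nat) : Int) 1).foldl
            (bBody ((PySem.Int.toChars k).map pvBDig))
            ((PySem.List.pyRange (PySem.List.pyGetD ((PySem.Int.toChars k).map pvBDig) 0 0 + 1) 10 1).foldl
              (fun v d => v.set d.toNat 1) (List.replicate 10 0),
             List.replicate 10 0, true, false)).2.2.1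
          && ((PySem.List.pyRange 1 ((((PySem.Int.toChars k).map pvBDig).length : Nat) : Int) 1).foldl
            (bBody ((PySem.Int.toChars k).map pvBDig))
            ((PySem.List.pyRange (PySem.List.pyGetD ((PySem.Int.toChars k).map pvBDig) 0 0 + 1) 10 1).foldl
              (fun v d => v.set d.toNat 1) (List.replicate 10 0),
             List.replicate 10 0, true, false)).2.2.2 then 1 else 0) := rfl
  rw [h1, hs]
  have hg0 : PySem.List.pyGetD ((c0 :: t).map pvBDig) 0 0 = pvDelta c0 := by
    rw [List.map_cons, PySem.List.pyGetD_zero_cons]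
    exact digB_val c0 (hdig c0 (by rw [hs]; simp))
  rw [hg0]
  have hdig' : ∀ x ∈ [c0] ++ t, pvIsDig x := by
    intro x hx; exact hdig x (by rw [hs]; simpa using hx)
  have h4 := bloop_run t [c0] (by simp) hdig'
    (((PySem.List.pyRange (pvDelta c0 + 1) 10 1).foldl
        (fun v d => v.set d.toNat 1) (List.replicate 10 0)),
     List.replicate 10 0, true, false)
  rw [show ([c0] ++ t) = c0 :: t from rfl] at h4
  rw [show (([c0] : List Char).length : Int) = (1:Int) from rfl] at h4
  rw [show ([c0] : List Char).getLast (by simp) = c0 from rfl] at h4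
  exact h4

theorem list10 (l : List Int) (h : l.length = 10) :
    ∃ a0 a1 a2 a3 a4 a5 a6 a7 a8 a9 : Int, l = [a0,a1,a2,a3,a4,a5,a6,a7,a8,a9] := by
  match l, h with
  | [a0,a1,a2,a3,a4,a5,a6,a7,a8,a9], _ => exact ⟨_,_,_,_,_,_,_,_,_,_,rfl⟩

theorem rng10 : PySem.List.pyRange 0 10 1 = [0,1,2,3,4,5,6,7,8,9] := by decide

set_option maxHeartbeats 2000000 in
theorem free_step (nodup dup : List Int) (hn : nodup.length = 10) (hd : dup.length = 10) (m : Nat) :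
    freeval (pvBFree nodup dup).1 (pvBFree nodup dup).2 m = freeval nodup dup (m + 1) := by
  obtain ⟨a0,a1,a2,a3,a4,a5,a6,a7,a8,a9,rfl⟩ := list10 nodup hn
  obtain ⟨b0,b1,b2,b3,b4,b5,b6,b7,b8,b9,rfl⟩ := list10 dup hd
  norm_num only [freeval, pvBFree, rng10, List.map_cons, List.map_nil, List.sum_cons, List.sum_nil,
    PySem.List.pyGetD_ofNat', List.getD, List.getElem?_cons_zero, List.getElem?_cons_succ,
    Option.getD_some, NDf, Wf, SIcf,
    show PySem.List.pyRange 0 0 1 = [] from by decide,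
    show PySem.List.pyRange 0 1 1 = [0] from by decide,
    show PySem.List.pyRange 0 2 1 = [0,1] from by decide,
    show PySem.List.pyRange 0 3 1 = [0,1,2] from by decide,
    show PySem.List.pyRange 0 4 1 = [0,1,2,3] from by decide,
    show PySem.List.pyRange 0 5 1 = [0,1,2,3,4] from by decide,
    show PySem.List.pyRange 0 6 1 = [0,1,2,3,4,5] from by decide,
    show PySem.List.pyRange 0 7 1 = [0,1,2,3,4,5,6] from by decide,
    show PySem.List.pyRange 0 8 1 = [0,1,2,3,4,5,6,7] from by decide,
    show PySem.List.pyRange 0 9 1 = [0,1,2,3,4,5,6,7,8] from by decide,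
    show PySem.List.pyRange 1 10 1 = [1,2,3,4,5,6,7,8,9] from by decide,
    show PySem.List.pyRange 2 10 1 = [2,3,4,5,6,7,8,9] from by decide,
    show PySem.List.pyRange 3 10 1 = [3,4,5,6,7,8,9] from by decide,
    show PySem.List.pyRange 4 10 1 = [4,5,6,7,8,9] from by decide,
    show PySem.List.pyRange 5 10 1 = [5,6,7,8,9] from by decide,
    show PySem.List.pyRange 6 10 1 = [6,7,8,9] from by decide,
    show PySem.List.pyRange 7 10 1 = [7,8,9] from by decide,
    show PySem.List.pyRange 8 10 1 = [8,9] from by decide,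
    show PySem.List.pyRange 9 10 1 = [9] from by decide,
    show PySem.List.pyRange 10 10 1 = [] from by decide]
  push_cast
  ring

def vF (b : Bool) (d : Int) (m : Nat) : Int := if b then NDf d m else Wf d m
def Rv (b : Bool) (p : Int) (m : Nat) : Int :=
  ((PySem.List.pyRange (p + 1) 10 1).map fun d => vF b d m).sum
def Tt (p : Int) (tdup : Bool) : List Int → Int
  | [] => if tdup then 1 else 0
  | c :: rest =>
    ((PySem.List.pyRange (max p (c + 1)) 10 1).map fun d =>
        vF (tdup || d == p) d rest.length).sum +
      (if c ≥ p then Tt c (tdup || c == p) rest else 0)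

def Eov (p : Int) (tdup : Bool) : List Int → Int
  | [] => 0
  | c :: rest =>
    if c < p then 0
    else if c = p then (if tdup then Eov p true rest else SIcf p (rest.length + 1))
    else Eov c tdup rest

theorem bfree_len (nodup dup : List Int) :
    (pvBFree nodup dup).1.length = 10 ∧ (pvBFree nodup dup).2.length = 10 := by
  simp [pvBFree, rng10]

set_option maxHeartbeats 2000000 in
theorem freeval_zero (nodup dup : List Int) (hn : nodup.length = 10) (hd : dup.length = 10) :
    freeval nodup dup 0 = dup.sum := by
  obtain ⟨a0,a1,a2,a3,a4,a5,a6,a7,a8,a9,rfl⟩ := list10 nodup hn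
  obtain ⟨b0,b1,b2,b3,b4,b5,b6,b7,b8,b9,rfl⟩ := list10 dup hd
  norm_num only [freeval, rng10, List.map_cons, List.map_nil, List.sum_cons, List.sum_nil,
    PySem.List.pyGetD_ofNat', List.getD, List.getElem?_cons_zero, List.getElem?_cons_succ,
    Option.getD_some, NDf, Wf, SIcf]
  ring

set_option maxHeartbeats 4000000 in
theorem freeval_set_dup (nodup dup : List Int) (hn : nodup.length = 10) (hd : dup.length = 10)
    (d : Int) (h0 : 0 ≤ d) (h9 : d ≤ 9) (m : Nat) :
    freeval nodup (dup.set d.toNat (PySem.List.pyGetD dup d 0 + 1)) m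
      = freeval nodup dup m + NDf d m := by
  obtain ⟨a0,a1,a2,a3,a4,a5,a6,a7,a8,a9,rfl⟩ := list10 nodup hn
  obtain ⟨b0,b1,b2,b3,b4,b5,b6,b7,b8,b9,rfl⟩ := list10 dup hd
  interval_cases d <;>
    (norm_num only [freeval, rng10, List.map_cons, List.map_nil, List.sum_cons, List.sum_nil,
       PySem.List.pyGetD_ofNat', List.getD, List.getElem?_cons_zero, List.getElem?_cons_succ,
       Option.getD_some, List.set, show (((0):Int).toNat) = 0 from rfl, show (((1):Int).toNat) = 1 from rfl, show (((2):Int).toNat) = 2 from rfl, show (((3):Int).toNat) = 3 from rfl, show (((4):Int).toNat) = 4 from rfl, show (((5):Int).toNat) = 5 from rfl, show (((6):Int).toNat) = 6 from rfl, show (((7):Int).toNat) = 7 from rfl, show (((8):Int).toNat) = 8 from rfl, show (((9):Int).toNat) = 9 from rfl]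
     ring)

set_option maxHeartbeats 4000000 in
theorem freeval_set_nodup (nodup dup : List Int) (hn : nodup.length = 10) (hd : dup.length = 10)
    (d : Int) (h0 : 0 ≤ d) (h9 : d ≤ 9) (m : Nat) :
    freeval (nodup.set d.toNat (PySem.List.pyGetD nodup d 0 + 1)) dup m
      = freeval nodup dup m + Wf d m := by
  obtain ⟨a0,a1,a2,a3,a4,a5,a6,a7,a8,a9,rfl⟩ := list10 nodup hn
  obtain ⟨b0,b1,b2,b3,b4,b5,b6,b7,b8,b9,rfl⟩ := list10 dup hd
  interval_cases d <;>
    (norm_num only [freeval, rng10, List.map_cons, List.map_nil, List.sum_cons, List.sum_nil,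
       PySem.List.pyGetD_ofNat', List.getD, List.getElem?_cons_zero, List.getElem?_cons_succ,
       Option.getD_some, List.set, show (((0):Int).toNat) = 0 from rfl, show (((1):Int).toNat) = 1 from rfl, show (((2):Int).toNat) = 2 from rfl, show (((3):Int).toNat) = 3 from rfl, show (((4):Int).toNat) = 4 from rfl, show (((5):Int).toNat) = 5 from rfl, show (((6):Int).toNat) = 6 from rfl, show (((7):Int).toNat) = 7 from rfl, show (((8):Int).toNat) = 8 from rfl, show (((9):Int).toNat) = 9 from rfl]
     ring)

theorem release_val (last : Int) (tdup : Bool) (m : Nat) :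
    ∀ (L : List Int), (∀ d ∈ L, 0 ≤ d ∧ d ≤ 9) →
    ∀ (nn nd : List Int), nn.length = 10 → nd.length = 10 →
    (freeval
        (L.foldl (fun (p : List Int × List Int) d =>
          if tdup || d == last then (p.1, p.2.set d.toNat (PySem.List.pyGetD p.2 d 0 + 1))
          else (p.1.set d.toNat (PySem.List.pyGetD p.1 d 0 + 1), p.2)) (nn, nd)).1
        (L.foldl (fun (p : List Int × List Int) d =>
          if tdup || d == last then (p.1, p.2.set d.toNat (PySem.List.pyGetD p.2 d 0 + 1))
          else (p.1.set d.toNat (PySem.List.pyGetD p.1 d 0 + 1), p.2)) (nn, nd)).2 m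
      = freeval nn nd m + (L.map fun d => vF (tdup || d == last) d m).sum)
    ∧ (L.foldl (fun (p : List Int × List Int) d =>
          if tdup || d == last then (p.1, p.2.set d.toNat (PySem.List.pyGetD p.2 d 0 + 1))
          else (p.1.set d.toNat (PySem.List.pyGetD p.1 d 0 + 1), p.2)) (nn, nd)).1.length = 10
    ∧ (L.foldl (fun (p : List Int × List Int) d =>
          if tdup || d == last then (p.1, p.2.set d.toNat (PySem.List.pyGetD p.2 d 0 + 1))
          else (p.1.set d.toNat (PySem.List.pyGetD p.1 d 0 + 1), p.2)) (nn, nd)).2.length = 10 := by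
  intro L
  induction L with
  | nil => intro _ nn nd hn hd; simp [hn, hd]
  | cons d L ih =>
    intro hL nn nd hn hd
    obtain ⟨hd0, hd9⟩ := hL d (by simp)
    have hL' : ∀ x ∈ L, 0 ≤ x ∧ x ≤ 9 := fun x hx => hL x (by simp [hx])
    simp only [List.foldl_cons, List.map_cons, List.sum_cons]
    by_cases hb : (tdup || d == last) = true
    · rw [hb]
      simp only [eq_self_iff_true, if_true, ite_true]
      have := ih hL' nn (nd.set d.toNat (PySem.List.pyGetD nd d 0 + 1)) hn (by simp [hd])
      refine ⟨?_, this.2.1, this.2.2⟩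
      rw [this.1, freeval_set_dup nn nd hn hd d hd0 hd9 m]
      simp only [vF, hb, if_pos]
      ring
    · rw [Bool.not_eq_true] at hb
      rw [hb]
      simp only [Bool.false_eq_true, if_false, ite_false]
      have := ih hL' (nn.set d.toNat (PySem.List.pyGetD nn d 0 + 1)) nd (by simp [hn]) hd
      refine ⟨?_, this.2.1, this.2.2⟩
      rw [this.1, freeval_set_nodup nn nd hn hd d hd0 hd9 m]
      simp only [vF, hb, Bool.false_eq_true, if_neg, ite_false]
      ring

theorem free_lemma (cs : List Int) : ∀ (nodup dup : List Int),
    nodup.length = 10 → dup.length = 10 → ∀ (tdup : Bool) (p : Int),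
    brun nodup dup false tdup p cs = freeval nodup dup cs.length := by
  induction cs with
  | nil => intro nodup dup hn hd tdup p; simp [brun, freeval_zero nodup dup hn hd]
  | cons c cs ih =>
    intro nodup dup hn hd tdup p
    show brun nodup dup false tdup p (c :: cs) = _
    unfold brun
    simp only [Bool.false_eq_true, if_neg, ite_false]
    rw [ih _ _ (bfree_len nodup dup).1 (bfree_len nodup dup).2 tdup c,
        free_step nodup dup hn hd cs.length]
    simp

theorem tight_lemma : ∀ (cs : List Int), (∀ d ∈ cs, 0 ≤ d ∧ d ≤ 9) →
    ∀ (p : Int), 0 ≤ p → ∀ (tdup : Bool) (nodup dup : List Int),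
    nodup.length = 10 → dup.length = 10 →
    brun nodup dup true tdup p cs = freeval nodup dup cs.length + Tt p tdup cs := by
  intro cs
  induction cs with
  | nil =>
    intro _ p _ tdup nodup dup hn hd
    simp [brun, Tt, freeval_zero nodup dup hn hd]
  | cons c cs ih =>
    intro hcs p hp tdup nodup dup hn hd
    have hc9 : ∀ d ∈ cs, 0 ≤ d ∧ d ≤ 9 := fun d hdm => hcs d (by simp [hdm])
    show brun nodup dup true tdup p (c :: cs) = _
    unfold brun
    simp only [if_true, ite_true]
    have hLb : ∀ d ∈ PySem.List.pyRange (max p (c+1)) 10 1, 0 ≤ d ∧ d ≤ 9 := by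
      intro d hdm
      rw [PySem.List.mem_pyRange_one] at hdm
      constructor <;> omega
    have hrel := release_val p tdup cs.length (PySem.List.pyRange (max p (c+1)) 10 1) hLb
      (pvBFree nodup dup).1 (pvBFree nodup dup).2 (bfree_len nodup dup).1 (bfree_len nodup dup).2
    have hrelval :
        freeval (pvBRelease p tdup (max p (c+1)) (pvBFree nodup dup).1 (pvBFree nodup dup).2).1
          (pvBRelease p tdup (max p (c+1)) (pvBFree nodup dup).1 (pvBFree nodup dup).2).2 cs.length
        = freeval nodup dup (cs.length + 1) +
          ((PySem.List.pyRange (max p (c+1)) 10 1).map fun d => vF (tdup || d == p) d cs.length).sum := by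
      show freeval _ _ _ = _
      rw [show pvBRelease p tdup (max p (c+1)) (pvBFree nodup dup).1 (pvBFree nodup dup).2
            = (PySem.List.pyRange (max p (c+1)) 10 1).foldl
                (fun (q : List Int × List Int) d =>
                  if tdup || d == p then (q.1, q.2.set d.toNat (PySem.List.pyGetD q.2 d 0 + 1))
                  else (q.1.set d.toNat (PySem.List.pyGetD q.1 d 0 + 1), q.2))
                ((pvBFree nodup dup).1, (pvBFree nodup dup).2) from rfl]
      rw [hrel.1, free_step nodup dup hn hd cs.length]
    have hlen1 : (pvBRelease p tdup (max p (c+1)) (pvBFree nodup dup).1 (pvBFree nodup dup).2).1.length = 10 := hrel.2.1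
    have hlen2 : (pvBRelease p tdup (max p (c+1)) (pvBFree nodup dup).1 (pvBFree nodup dup).2).2.length = 10 := hrel.2.2
    by_cases hge : c ≥ p
    · rw [if_pos hge]
      rw [ih hc9 c (by have := hcs c (by simp); omega) (tdup || c == p)
           (pvBRelease p tdup (max p (c+1)) (pvBFree nodup dup).1 (pvBFree nodup dup).2).1
           (pvBRelease p tdup (max p (c+1)) (pvBFree nodup dup).1 (pvBFree nodup dup).2).2 hlen1 hlen2]
      show freeval _ _ _ + _ = _
      rw [hrelval]
      show _ = freeval nodup dup (cs.length + 1) + Tt p tdup (c :: cs)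
      conv_rhs => rw [Tt]
      rw [if_pos hge]
      ring_nf
    · rw [if_neg hge]
      rw [free_lemma cs
           (pvBRelease p tdup (max p (c+1)) (pvBFree nodup dup).1 (pvBFree nodup dup).2).1
           (pvBRelease p tdup (max p (c+1)) (pvBFree nodup dup).1 (pvBFree nodup dup).2).2 hlen1 hlen2 tdup c]
      show freeval _ _ _ = _
      rw [hrelval]
      show _ = freeval nodup dup (cs.length + 1) + Tt p tdup (c :: cs)
      conv_rhs => rw [Tt]
      rw [if_neg hge]
      ring_nf

theorem sum_map_sub (l : List Int) (f g : Int → Int) :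
    (l.map fun x => f x - g x).sum = (l.map f).sum - (l.map g).sum := by
  induction l with
  | nil => simp
  | cons x l ih => simp [ih]; ring

theorem ND_succ (p : Int) (m : Nat) :
    NDf p (m+1) = ((PySem.List.pyRange p 10 1).map fun e => NDf e m).sum := rfl
theorem SIc_succ (q : Int) (m : Nat) :
    SIcf q (m+1) = ((PySem.List.pyRange (q+1) 10 1).map fun e => SIcf e m).sum := rfl

theorem Rv_true (p : Int) (m : Nat) : Rv true p m = NDf (p+1) (m+1) := by
  rw [ND_succ]; unfold Rv vF; simp

theorem Rv_false (p : Int) (m : Nat) : Rv false p m = NDf (p+1) (m+1) - SIcf p (m+1) := by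
  rw [ND_succ, SIc_succ]
  unfold Rv vF Wf
  simp only [Bool.false_eq_true, if_false, ite_false]
  exact sum_map_sub _ _ _

theorem ND_peel (p : Int) (h : p < 10) (m : Nat) : NDf p (m+1) = NDf p m + NDf (p+1) (m+1) := by
  rw [ND_succ, PySem.List.pyRange_one_cons h, List.map_cons, List.sum_cons, ← ND_succ]

theorem SIc_peel (p : Int) (h : p < 10) (m : Nat) : SIcf (p-1) (m+1) = SIcf p m + SIcf p (m+1) := by
  rw [SIc_succ, show p - 1 + 1 = p by ring, PySem.List.pyRange_one_cons h, List.map_cons,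
      List.sum_cons, ← SIc_succ]

theorem ND_one (q : Int) (h : q ≤ 10) : NDf q 1 = 10 - q := by
  rw [ND_succ]
  rw [show ((PySem.List.pyRange q 10 1).map fun e => NDf e 0) = (PySem.List.pyRange q 10 1).map (fun _ => (1:Int)) from List.map_congr_left (fun e _ => rfl)]
  rw [PySem.List.sum_map_const_int, PySem.List.length_pyRange_one]
  omega

theorem SIc_one (q : Int) (h0 : -1 ≤ q) (h : q ≤ 9) : SIcf q 1 = 9 - q := by
  rw [SIc_succ]
  rw [show ((PySem.List.pyRange (q+1) 10 1).map fun e => SIcf e 0) = (PySem.List.pyRange (q+1) 10 1).map (fun _ => (1:Int)) from List.map_congr_left (fun e _ => rfl)]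
  rw [PySem.List.sum_map_const_int, PySem.List.length_pyRange_one]
  omega

theorem fterm_9 (flag : Bool) (p : Int) (h0 : 0 ≤ p) (h9 : p ≤ 9) (m : Nat) :
    (if flag then pvCi else pvWithdup) (9 - p) ((m:Int) + 2) = Rv flag p (m+1) := by
  have hc : (9 - p : Int) = 10 - (p+1) := by ring
  have hcast : ((m:Int) + 2) = ((m+2 : Nat) : Int) := by push_cast; ring
  cases flag
  · simp only [Bool.false_eq_true, if_false, ite_false]
    unfold pvWithdup
    rw [hc, hcast, ci_eq_ND (m+2) (p+1) (by omega) (by omega) (Or.inr (by omega)), ← hc,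
        show (9 - p : Int) = 9 - p from rfl,
        nd_eq_SIc (m+2) p (by omega) (by omega), Rv_false]
  · simp only [if_true, ite_true]
    rw [hc, hcast, ci_eq_ND (m+2) (p+1) (by omega) (by omega) (Or.inr (by omega)), Rv_true]

theorem fterm_break (flag : Bool) (p : Int) (h0 : 0 ≤ p) (h9 : p ≤ 9) (m : Nat) :
    (if flag then pvCi else pvWithdup) (10 - p) ((m:Int) + 2)
      = NDf p m + Rv flag p m + Rv flag p (m+1) := by
  have hcast : ((m:Int) + 2) = ((m+2 : Nat) : Int) := by push_cast; ring
  cases flag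
  · simp only [Bool.false_eq_true, if_false, ite_false]
    unfold pvWithdup
    rw [hcast, ci_eq_ND (m+2) p (by omega) (by omega) (Or.inl h9),
        show (10 - p : Int) = 9 - (p - 1) by ring,
        nd_eq_SIc (m+2) (p-1) (by omega) (by omega)]
    rw [show m + 2 = (m+1) + 1 from rfl, ND_peel p (by omega) (m+1),
        ND_peel p (by omega) m, SIc_peel p (by omega) (m+1),
        Rv_false, Rv_false]
    ring
  · simp only [if_true, ite_true]
    rw [hcast, ci_eq_ND (m+2) p (by omega) (by omega) (Or.inl h9)]
    rw [show m + 2 = (m+1) + 1 from rfl, ND_peel p (by omega) (m+1),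
        ND_peel p (by omega) m, Rv_true, Rv_true]

theorem fterm_base (flag : Bool) (p : Int) (h0 : 0 ≤ p) (h9 : p ≤ 9) :
    (if flag then pvCi else pvWithdup) (10 - p) 1 = (if flag then 1 else 0) + Rv flag p 0 := by
  have h1 : (1 : Int) = ((1 : Nat) : Int) := rfl
  cases flag
  · simp only [Bool.false_eq_true, if_false, ite_false]
    unfold pvWithdup
    rw [h1, ci_eq_ND 1 p (by omega) (by omega) (Or.inl h9),
        show (10 - p : Int) = 9 - (p - 1) by ring, nd_eq_SIc 1 (p-1) (by omega) (by omega),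
        Rv_false, ND_one p (by omega), ND_one (p+1) (by omega),
        SIc_one (p-1) (by omega) (by omega), SIc_one p (by omega) (by omega)]
    ring
  · simp only [if_true, ite_true]
    rw [h1, ci_eq_ND 1 p (by omega) (by omega) (Or.inl h9), Rv_true,
        ND_one p (by omega), ND_one (p+1) (by omega)]
    ring

theorem relsum_lt (flag : Bool) (p c : Int) (hc : c < p) (h0 : 0 ≤ p) (hp : p ≤ 9) (m : Nat) :
    ((PySem.List.pyRange (max p (c+1)) 10 1).map fun d => vF (flag || d == p) d m).sum
      = NDf p m + Rv flag p m := by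
  rw [max_eq_left (by omega), PySem.List.pyRange_one_cons (by omega), List.map_cons, List.sum_cons]
  congr 1
  · show vF (flag || p == p) p m = NDf p m
    simp [vF]
  · unfold Rv
    congr 1
    apply List.map_congr_left
    intro d hd
    rw [PySem.List.mem_pyRange_one] at hd
    have : (d == p) = false := by simp; omega
    rw [this, Bool.or_false]

theorem relsum_ge (flag : Bool) (p c : Int) (hc : p ≤ c) (m : Nat) :
    ((PySem.List.pyRange (max p (c+1)) 10 1).map fun d => vF (flag || d == p) d m).sum
      = Rv flag c m := by
  rw [max_eq_right (by omega)]
  unfold Rv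
  congr 1
  apply List.map_congr_left
  intro d hd
  rw [PySem.List.mem_pyRange_one] at hd
  have : (d == p) = false := by simp; omega
  rw [this, Bool.or_false]

theorem eov_true (cs : List Int) : ∀ p, Eov p true cs = 0 := by
  induction cs with
  | nil => intro p; rfl
  | cons c cs ih =>
    intro p
    show Eov p true (c :: cs) = 0
    rcases lt_trichotomy c p with h | h | h
    · simp [Eov, h]
    · subst h
      simp [Eov, ih]
    · have h1 : ¬ c < p := by omega
      have h2 : ¬ c = p := by omega
      simp [Eov, h1, h2, ih]

theorem master_lemma : ∀ (cs : List Int), (∀ d ∈ cs, 0 ≤ d ∧ d ≤ 9) →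
    ∀ (p : Int), 0 ≤ p → p ≤ 9 → ∀ (flag : Bool),
    arun p flag cs = Tt p flag cs + Rv flag p cs.length + Eov p flag cs := by
  intro cs
  induction cs with
  | nil =>
    intro _ p h0 h9 flag
    show arun p flag [] = Tt p flag [] + Rv flag p 0 + Eov p flag []
    unfold arun Tt Eov
    rw [fterm_base flag p h0 h9]
    ring
  | cons c cs ih =>
    intro hcs p h0 h9 flag
    obtain ⟨hc0, hc9⟩ := hcs c (by simp)
    have hcs' : ∀ d ∈ cs, 0 ≤ d ∧ d ≤ 9 := fun d hd => hcs d (by simp [hd])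
    show arun p flag (c :: cs) = Tt p flag (c :: cs) + Rv flag p (c :: cs).length + Eov p flag (c :: cs)
    rw [show (c :: cs).length = cs.length + 1 from rfl]
    rcases lt_trichotomy c p with hlt | heq | hgt
    · -- break
      rw [show arun p flag (c :: cs) = (if flag then pvCi else pvWithdup) (10 - p) ((cs.length : Int) + 2) from by
            unfold arun; rw [if_pos hlt]]
      rw [show Tt p flag (c :: cs) =
            ((PySem.List.pyRange (max p (c + 1)) 10 1).map fun d => vF (flag || d == p) d cs.length).sum from by
            conv_lhs => rw [Tt]
            rw [if_neg (by omega)]; ring]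
      rw [show Eov p flag (c :: cs) = 0 from by
            unfold Eov; rw [if_pos hlt]]
      rw [relsum_lt flag p c hlt h0 h9 cs.length, fterm_break flag p h0 h9 cs.length]
      ring
    · -- equal digit
      subst heq
      have hbeq : (c == c) = true := by simp
      rw [show arun c flag (c :: cs) = (if flag then pvCi else pvWithdup) (9 - c) ((cs.length : Int) + 2)
            + arun c true cs from by
            conv_lhs => rw [arun]
            rw [if_neg (by omega), hbeq, Bool.or_true]]
      rw [show Tt c flag (c :: cs) =
            ((PySem.List.pyRange (max c (c + 1)) 10 1).map fun d => vF (flag || d == c) d cs.length).sum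
            + Tt c true cs from by
            conv_lhs => rw [Tt]
            rw [if_pos (by omega), hbeq, Bool.or_true]]
      rw [show Eov c flag (c :: cs) = (if flag then Eov c true cs else SIcf c (cs.length + 1)) from by
            conv_lhs => rw [Eov]
            rw [if_neg (by omega), if_pos rfl]]
      rw [ih hcs' c hc0 hc9 true, relsum_ge flag c c (le_refl c) cs.length,
          fterm_9 flag c hc0 hc9 cs.length]
      cases flag
      · rw [eov_true cs c]
        simp only [Bool.false_eq_true, if_false, ite_false]
        rw [Rv_true, Rv_false, Rv_false]
        ring
      · simp only [if_true, ite_true]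
        ring
    · -- c > p
      have hbeq : (c == p) = false := by simp; omega
      rw [show arun p flag (c :: cs) = (if flag then pvCi else pvWithdup) (9 - p) ((cs.length : Int) + 2)
            + arun c flag cs from by
            conv_lhs => rw [arun]
            rw [if_neg (by omega), hbeq, Bool.or_false]]
      rw [show Tt p flag (c :: cs) =
            ((PySem.List.pyRange (max p (c + 1)) 10 1).map fun d => vF (flag || d == p) d cs.length).sum
            + Tt c flag cs from by
            conv_lhs => rw [Tt]
            rw [if_pos (by omega), hbeq, Bool.or_false]]
      rw [show Eov p flag (c :: cs) = Eov c flag cs from by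
            conv_lhs => rw [Eov]
            rw [if_neg (by omega), if_neg (by omega)]]
      rw [ih hcs' c hc0 hc9 flag, relsum_ge flag p c (by omega) cs.length,
          fterm_9 flag p h0 h9 cs.length]
      ring

theorem fold_set (L : List Int) : ∀ (base : List Int),
    ((L.foldl (fun v d => v.set d.toNat 1) base).length = base.length)
    ∧ ∀ j : Nat, (L.foldl (fun v d => v.set d.toNat 1) base).getD j 0
        = if (∃ d ∈ L, d.toNat = j) then (if j < base.length then 1 else 0) else base.getD j 0 := by
  induction L with
  | nil => intro base; simp
  | cons d L ih =>
    intro base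
    simp only [List.foldl_cons]
    refine ⟨by rw [(ih _).1]; simp, fun j => ?_⟩
    rw [(ih (base.set d.toNat 1)).2 j]
    by_cases hmem : ∃ x ∈ L, x.toNat = j
    · obtain ⟨x, hx, hxe⟩ := hmem
      rw [if_pos ⟨x, hx, hxe⟩, List.length_set,
          if_pos (⟨x, List.mem_cons_of_mem _ hx, hxe⟩ : ∃ y ∈ d :: L, y.toNat = j)]
    · rw [if_neg hmem]
      by_cases hj : d.toNat = j
      · rw [if_pos (⟨d, List.mem_cons_self, hj⟩ : ∃ y ∈ d :: L, y.toNat = j)]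
        subst hj
        by_cases hlt : d.toNat < base.length
        · rw [if_pos hlt, List.getD_eq_getElem?_getD, List.getElem?_set_self (by omega)]
          simp
        · rw [if_neg hlt, List.getD_eq_getElem?_getD, List.getElem?_eq_none (by simp; omega)]
          simp
      · have hno : ¬ ∃ y ∈ d :: L, y.toNat = j := by
          rintro ⟨x, hx, hxe⟩
          rcases List.mem_cons.mp hx with h | h
          · exact hj (h ▸ hxe)
          · exact hmem ⟨x, h, hxe⟩
        rw [if_neg hno, List.getD_eq_getElem?_getD, List.getElem?_set_ne (by omega),
            ← List.getD_eq_getElem?_getD]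

theorem sum_ite_ge (f : Int → Int) (p : Int) (h0 : 0 ≤ p) (h10 : p + 1 ≤ 10) :
    ((PySem.List.pyRange 0 10 1).map fun d => if p + 1 ≤ d then f d else 0).sum
      = ((PySem.List.pyRange (p+1) 10 1).map f).sum := by
  rw [PySem.List.pyRange_one_append 0 (p+1) 10 (by omega) (by omega), List.map_append,
      List.sum_append]
  have h1 : ((PySem.List.pyRange 0 (p+1) 1).map fun d => if p + 1 ≤ d then f d else 0)
      = (PySem.List.pyRange 0 (p+1) 1).map fun _ => 0 := by
    apply List.map_congr_left
    intro d hd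
    rw [PySem.List.mem_pyRange_one] at hd
    rw [if_neg (by omega)]
  have h2 : ((PySem.List.pyRange (p+1) 10 1).map fun d => if p + 1 ≤ d then f d else 0)
      = (PySem.List.pyRange (p+1) 10 1).map f := by
    apply List.map_congr_left
    intro d hd
    rw [PySem.List.mem_pyRange_one] at hd
    rw [if_pos (by omega)]
  rw [h1, h2, PySem.List.sum_map_const_int]
  ring

theorem init_freeval (p : Int) (h0 : 0 ≤ p) (h9 : p ≤ 9) (m : Nat) :
    freeval
      ((PySem.List.pyRange (p + 1) 10 1).foldl (fun v d => v.set d.toNat 1)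
        (List.replicate 10 0))
      (List.replicate 10 0) m = Rv false p m := by
  unfold freeval
  have hcongr : ∀ d ∈ PySem.List.pyRange 0 10 1,
      PySem.List.pyGetD (List.replicate 10 (0:Int)) d 0 * NDf d m +
        PySem.List.pyGetD ((PySem.List.pyRange (p + 1) 10 1).foldl (fun v d => v.set d.toNat 1)
          (List.replicate 10 0)) d 0 * Wf d m
      = (if p + 1 ≤ d then Wf d m else 0) := by
    intro d hd
    rw [PySem.List.mem_pyRange_one] at hd
    have hza : PySem.List.pyGetD (List.replicate 10 (0:Int)) d 0 = 0 := by
      rw [PySem.List.pyGetD_eq_getElem _ _ (by omega) (by simp; omega), List.getElem_replicate]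
    have hfold := (fold_set (PySem.List.pyRange (p + 1) 10 1) (List.replicate 10 (0:Int)))
    have hlen : ((PySem.List.pyRange (p + 1) 10 1).foldl (fun v d => v.set d.toNat 1)
        (List.replicate 10 (0:Int))).length = 10 := by rw [hfold.1]; simp
    have hgd : PySem.List.pyGetD ((PySem.List.pyRange (p + 1) 10 1).foldl (fun v d => v.set d.toNat 1)
        (List.replicate 10 (0:Int))) d 0
        = if p + 1 ≤ d then 1 else 0 := by
      rw [PySem.List.pyGetD_eq_getElem _ _ (by omega) (by rw [hlen]; omega),
          ← List.getD_eq_getElem _ 0 (by rw [hlen]; omega), hfold.2 d.toNat]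
      by_cases hge : p + 1 ≤ d
      · rw [if_pos ⟨d, by rw [PySem.List.mem_pyRange_one]; exact ⟨hge, by omega⟩, rfl⟩,
            if_pos (by simp; omega), if_pos hge]
      · rw [if_neg (by rintro ⟨x, hx, hxe⟩; rw [PySem.List.mem_pyRange_one] at hx; omega),
            List.getD_eq_getElem?_getD, List.getElem?_eq_getElem (by simp; omega),
            Option.getD_some, List.getElem_replicate]
        exact (if_neg hge).symm
    rw [hza, hgd]
    by_cases hge : p + 1 ≤ d
    · rw [if_pos hge, if_pos hge]; ring
    · rw [if_neg hge, if_neg hge]; ring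
  rw [List.map_congr_left hcongr, sum_ite_ge _ p h0 (by omega)]
  rfl

theorem SIc_choose (q : Int) (h0 : 0 ≤ q) (h9 : q ≤ 9) (M : Nat) :
    SIcf q M = (((9 - q).toNat).choose M : Int) := by
  rw [← nd_eq_SIc M q (by omega) h9, nd_eq_choose _ _ (by omega) (by omega)]
  norm_num [Int.toNat_natCast]

theorem eov_dscan : ∀ (cs : List Int), (∀ d ∈ cs, 0 ≤ d ∧ d ≤ 9) →
    ∀ (p : Int), 0 ≤ p → p ≤ 9 →
    (Eov p false cs = 0 ↔ pvDScan (p :: cs) = false) := by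
  intro cs
  induction cs with
  | nil => intro _ p _ _; simp [Eov, pvDScan]
  | cons c cs ih =>
    intro hcs p hp0 hp9
    obtain ⟨hc0, hc9⟩ := hcs c (by simp)
    have hcs' : ∀ d ∈ cs, 0 ≤ d ∧ d ≤ 9 := fun d hd => hcs d (by simp [hd])
    rcases lt_trichotomy c p with hlt | heq | hgt
    · rw [show Eov p false (c :: cs) = 0 from by unfold Eov; rw [if_pos hlt],
          show pvDScan (p :: c :: cs) = false from by
            unfold pvDScan; rw [if_neg (by omega), if_pos hlt]]
      simp
    · subst heq
      rw [show Eov c false (c :: cs) = SIcf c (cs.length + 1) from by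
            conv_lhs => rw [Eov]
            rw [if_neg (by omega), if_pos rfl]; rfl,
          show pvDScan (c :: c :: cs) = decide (c + ((cs.length : Int) + 1) ≤ 9) from by
            unfold pvDScan; rw [if_pos rfl]]
      rw [SIc_choose c hc0 hc9 (cs.length + 1)]
      constructor
      · intro h
        have : ((9 - c).toNat).choose (cs.length + 1) = 0 := by exact_mod_cast h
        rw [Nat.choose_eq_zero_iff] at this
        simp only [decide_eq_false_iff_not]
        omega
      · intro h
        simp only [decide_eq_false_iff_not] at h
        rw [Nat.choose_eq_zero_of_lt (by omega)]
        simp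
    · rw [show Eov p false (c :: cs) = Eov c false cs from by
            conv_lhs => rw [Eov]
            rw [if_neg (by omega), if_neg (by omega)],
          show pvDScan (p :: c :: cs) = pvDScan (c :: cs) from by
            conv_lhs => rw [pvDScan]
            rw [if_neg (by omega), if_neg (by omega)]]
      exact ih hcs' c hc0 hc9

theorem ab_diff (k : Int) (hk : 0 ≤ k) :
    countFrom k - countFrom_alt k =
      Eov (pvDelta ((PySem.Int.toChars k).headI)) false
        ((PySem.Int.toChars k).tail.map pvDelta) := by
  obtain ⟨hne, hdig⟩ := toChars_digits k hk
  set p := pvDelta ((PySem.Int.toChars k).headI) with hp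
  set cs := (PySem.Int.toChars k).tail.map pvDelta with hcs
  have hhead : (PySem.Int.toChars k).headI ∈ PySem.Int.toChars k := by
    cases h : PySem.Int.toChars k with
    | nil => exact absurd h hne
    | cons a b => simp
  have hpb : 0 ≤ p ∧ p ≤ 9 := delta_bounds _ (hdig _ hhead)
  have hcsb : ∀ d ∈ cs, 0 ≤ d ∧ d ≤ 9 := by
    intro d hd
    rw [hcs] at hd
    obtain ⟨c, hc, rfl⟩ := List.mem_map.mp hd
    exact delta_bounds c (hdig c (List.mem_of_mem_tail hc))
  have hinitlen : ((PySem.List.pyRange (p + 1) 10 1).foldl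
      (fun v d => v.set d.toNat 1) (List.replicate 10 (0:Int))).length = 10 := by
    rw [(fold_set (PySem.List.pyRange (p + 1) 10 1) (List.replicate 10 0)).1]
    simp
  rw [aphase k hk, bphase k hk, ← hp, ← hcs,
      tight_lemma cs hcsb p hpb.1 false _ _ hinitlen (by simp),
      master_lemma cs hcsb p hpb.1 hpb.2 false,
      init_freeval p hpb.1 hpb.2 cs.length]
  ring

theorem dscan_delta (k : Int) :
    ((PySem.Int.toChars k).map pvDDig) = ((PySem.Int.toChars k).map pvDelta) := rfl

theorem eov_iff_D (k : Int) (hk : 0 ≤ k) :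
    (Eov (pvDelta ((PySem.Int.toChars k).headI)) false
        ((PySem.Int.toChars k).tail.map pvDelta) = 0)
      ↔ ¬ D_countFrom k := by
  obtain ⟨hne, hdig⟩ := toChars_digits k hk
  obtain ⟨c0, t, hs⟩ : ∃ c0 t, PySem.Int.toChars k = c0 :: t := by
    cases h : PySem.Int.toChars k with
    | nil => exact absurd h hne
    | cons a b => exact ⟨a, b, rfl⟩
  have hpb := delta_bounds c0 (hdig c0 (by rw [hs]; simp))
  have hcsb : ∀ d ∈ t.map pvDelta, 0 ≤ d ∧ d ≤ 9 := by
    intro d hd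
    obtain ⟨c, hc, rfl⟩ := List.mem_map.mp hd
    exact delta_bounds c (hdig c (by rw [hs]; simp [hc]))
  have h1 := eov_dscan (t.map pvDelta) hcsb (pvDelta c0) hpb.1 hpb.2
  unfold D_countFrom
  rw [dscan_delta, hs]
  simp only [List.map_cons, List.headI, List.tail]
  rw [show (pvDelta c0 :: t.map pvDelta) = pvDelta c0 :: t.map pvDelta from rfl]
  constructor
  · intro h
    rw [h1.mp h]
    simp
  · intro h
    apply h1.mpr
    simpa using h

-- ===== VERDICT (by name: the statement is the Claim_ definition above) =====
theorem countFrom_spec : Claim_unchanged_countFrom := by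
  intro k _ hpre
  unfold Spec_countFrom
  intro hnd
  have hk : 0 ≤ k := hpre
  have h := ab_diff k hk
  rw [(eov_iff_D k hk).mpr hnd] at h
  omega

theorem countFrom_changed : Claim_changed_countFrom := by
  unfold Claim_changed_countFrom; decide

theorem countFrom_tight : Claim_exact_countFrom := by
  intro k _ hpre hd
  have hk : 0 ≤ k := hpre
  have h := ab_diff k hk
  intro hcon
  rw [hcon] at h
  exact ((eov_iff_D k hk).mp (by omega)) hd
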